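-- pv_equiv track=rewrite | github.com/mylo-james/MyloWare | src/myloware/services/transcode.py | _hostname_in_allowlist
-- ===== SOURCE A (Python) =====
-- def _hostname_in_allowlist(hostname: str, allowed_domains: list[str]) -> bool:
--     """Return True if hostname matches an allowed domain exactly or as a subdomain.
--
--     Avoids bypasses like allowing "example.com" and matching "badexample.com".
--     """
--     host = (hostname or "").strip().lower().rstrip(".")
--     if not host:
--         return False
--     for raw in allowed_domains:
--         dom = (raw or "").strip().lower().strip(".")
--         if not dom:
--             continue
--         if host == dom or host.endswith(f".{dom}"):
--             return True
--     return False
-- ===== SOURCE B (Python) =====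
-- def _hostname_in_allowlist(hostname: str, allowed_domains: list[str]) -> bool:
--     """Return True if hostname matches an allowed domain exactly or as a subdomain."""
--     domains = set()
--     for raw in allowed_domains:
--         dom = (raw or "").strip().lower().strip(".")
--         if dom:
--             domains.add(dom)
--     host = (hostname or "").strip().lower().rstrip(".")
--     if not host:
--         return False
--     parts = host.split(".")
--     return any(".".join(parts[i:]) in domains for i in range(len(parts)))
-- ===== Notes on version B (the rewrite author's own statement) =====
-- stated objective: alternative
-- what changed: B pre-builds a set of normalized allowed domains once and then probes each dot-suffix of the host against it, instead of A's per-domain normalization and string comparison inside the loop.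
import Mathlib
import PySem

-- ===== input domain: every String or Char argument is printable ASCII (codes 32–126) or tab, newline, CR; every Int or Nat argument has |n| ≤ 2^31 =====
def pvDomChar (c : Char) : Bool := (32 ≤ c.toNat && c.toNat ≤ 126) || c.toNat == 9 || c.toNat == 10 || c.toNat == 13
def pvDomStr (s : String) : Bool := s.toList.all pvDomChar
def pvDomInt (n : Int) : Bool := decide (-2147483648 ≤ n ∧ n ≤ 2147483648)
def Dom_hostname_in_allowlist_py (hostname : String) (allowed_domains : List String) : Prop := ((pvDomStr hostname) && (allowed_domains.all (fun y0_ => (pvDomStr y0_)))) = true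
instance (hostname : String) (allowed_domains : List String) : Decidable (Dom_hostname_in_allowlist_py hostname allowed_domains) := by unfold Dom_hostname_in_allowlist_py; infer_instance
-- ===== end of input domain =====

-- B replaces A's per-domain normalize-and-compare loop by a set of normalized allowed domains
-- probed with each dot-suffix of the host (objective: alternative traversal, same behaviour).

-- ===== PORT A =====
-- hand port of s.rstrip('.') (drop trailing '.' characters); exact: PySem has no rstrip-with-chars
def pvRstripDot (cs : List Char) : List Char := (cs.reverse.dropWhile (· == '.')).reverse

-- (hostname or "").strip().lower().rstrip(".")  — 'or ""' is the identity on str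
def pvNormHost (s : String) : List Char :=
  pvRstripDot (PySem.Chars.lower (PySem.Chars.strip s.toList))

-- (raw or "").strip().lower().strip(".")  — shared normalization line of both Pythons
def pvNormDom (s : String) : List Char :=
  PySem.Chars.stripChars (PySem.Chars.lower (PySem.Chars.strip s.toList)) ['.']

def hostname_in_allowlist_py (hostname : String) (allowed_domains : List String) : Bool :=
  let host := pvNormHost hostname
  if host = [] then false
  else allowed_domains.any (fun raw =>
    let dom := pvNormDom raw
    if dom = [] then false
    else (host == dom || PySem.Chars.endswith host ('.' :: dom)))

-- ===== PORT B =====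
def hostname_in_allowlist_py_alt (hostname : String) (allowed_domains : List String) : Bool :=
  let domains : PySem.Set (List Char) := allowed_domains.foldl (fun s raw =>
    let dom := pvNormDom raw
    if dom = [] then s else PySem.Set.add s dom) PySem.Set.empty
  let host := pvNormHost hostname
  if host = [] then false
  else
    let parts := PySem.Chars.splitOn host ['.']
    (List.range parts.length).any (fun i =>
      PySem.Set.contains domains (PySem.Chars.join ['.'] (parts.drop i)))

-- ===== PRECONDITION & SPEC =====
def Spec_hostname_in_allowlist_py (hostname : String) (allowed_domains : List String) (out : Bool) : Prop := out = hostname_in_allowlist_py_alt hostname allowed_domains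
instance (hostname : String) (allowed_domains : List String) (out : Bool) : Decidable (Spec_hostname_in_allowlist_py hostname allowed_domains out) := by unfold Spec_hostname_in_allowlist_py; infer_instance

-- ===== CLAIM (what is proved, stated in full; the proofs are below) =====
def Claim_equal_hostname_in_allowlist_py : Prop := ∀ (hostname : String) (allowed_domains : List String), Dom_hostname_in_allowlist_py hostname allowed_domains → Spec_hostname_in_allowlist_py hostname allowed_domains (hostname_in_allowlist_py hostname allowed_domains)

-- ===== LEMMAS AND PROOFS =====

-- proof-side structural version of host.split('.')
def pvDsplit : List Char → List (List Char)
  | [] => [[]]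
  | c :: rest =>
    if c = '.' then [] :: pvDsplit rest
    else match pvDsplit rest with
      | [] => [[c]]
      | p :: ps => (c :: p) :: ps

theorem pvDsplit_ne_nil (cs : List Char) : pvDsplit cs ≠ [] := by
  cases cs with
  | nil => simp [pvDsplit]
  | cons c rest =>
    simp only [pvDsplit]
    split_ifs
    · simp
    · cases pvDsplit rest <;> simp

theorem pvSplitOn_go_eq (fuel : Nat) (l cur : List Char) (acc : List (List Char))
    (h : l.length ≤ fuel) :
    PySem.Chars.splitOn.go ['.'] fuel l cur acc
      = acc.reverse ++ (pvDsplit l).modifyHead (cur.reverse ++ ·) := by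
  induction fuel generalizing l cur acc with
  | zero =>
    have hl : l = [] := by cases l <;> simp_all
    subst hl
    simp [PySem.Chars.splitOn.go, pvDsplit]
  | succ fuel ih =>
    cases l with
    | nil => simp [PySem.Chars.splitOn.go, pvDsplit]
    | cons c rest =>
      rw [PySem.Chars.splitOn.go]
      by_cases hc : c = '.'
      · subst hc
        have hp : List.isPrefixOf ['.'] ('.' :: rest) = true := by
          simp [List.isPrefixOf]
        rw [if_pos hp]
        simp only [List.length_cons, List.drop_succ_cons, List.length_nil, List.drop_zero]
        rw [ih rest [] _ (by simpa using Nat.le_of_succ_le_succ (by simpa using h))]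
        simp only [pvDsplit, reduceIte]
        cases hdr : pvDsplit rest with
        | nil => exact absurd hdr (pvDsplit_ne_nil rest)
        | cons p ps => simp
      · have hp : List.isPrefixOf ['.'] (c :: rest) = false := by
          simp [List.isPrefixOf]
          exact fun hh => absurd hh.symm hc
        rw [if_neg (by simp [hp])]
        rw [ih rest (c :: cur) acc (by simpa using Nat.le_of_succ_le_succ (by simpa using h))]
        simp only [pvDsplit, if_neg hc]
        cases hdr : pvDsplit rest with
        | nil => exact absurd hdr (pvDsplit_ne_nil rest)
        | cons p ps => simp

theorem pvSplitOn_eq_dsplit (cs : List Char) :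
    PySem.Chars.splitOn cs ['.'] = pvDsplit cs := by
  rw [PySem.Chars.splitOn, pvSplitOn_go_eq _ _ _ _ (by omega)]
  cases hdr : pvDsplit cs with
  | nil => exact absurd hdr (pvDsplit_ne_nil cs)
  | cons p ps => simp

theorem pvJoin_dsplit (cs : List Char) :
    PySem.Chars.join ['.'] (pvDsplit cs) = cs := by
  induction cs with
  | nil => simp [pvDsplit, PySem.Chars.join_singleton]
  | cons c rest ih =>
    simp only [pvDsplit]
    by_cases hc : c = '.'
    · subst hc
      rw [if_pos rfl]
      cases hdr : pvDsplit rest with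
      | nil => exact absurd hdr (pvDsplit_ne_nil rest)
      | cons p ps =>
        rw [PySem.Chars.join_cons_cons]
        rw [hdr] at ih
        simp [ih]
    · rw [if_neg hc]
      cases hdr : pvDsplit rest with
      | nil => exact absurd hdr (pvDsplit_ne_nil rest)
      | cons p ps =>
        rw [hdr] at ih
        cases ps with
        | nil => simp_all [PySem.Chars.join_singleton]
        | cons q qs =>
          rw [PySem.Chars.join_cons_cons] at ih ⊢
          simp [← ih]

theorem pvSuffix_char (cs dom : List Char) :
    (∃ j, j + 1 < (pvDsplit cs).length ∧
        PySem.Chars.join ['.'] ((pvDsplit cs).drop (j + 1)) = dom)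
      ↔ ('.' :: dom) <:+ cs := by
  induction cs generalizing dom with
  | nil => simp [pvDsplit]
  | cons c rest ih =>
    by_cases hc : c = '.'
    · subst hc
      simp only [pvDsplit, reduceIte]
      rw [List.suffix_cons_iff]
      constructor
      · rintro ⟨j, hj, hjoin⟩
        simp only [List.length_cons, List.drop_succ_cons] at hj hjoin
        cases j with
        | zero =>
          left
          rw [List.drop_zero, pvJoin_dsplit] at hjoin
          simp [hjoin]
        | succ j =>
          right
          exact (ih dom).mp ⟨j, by omega, hjoin⟩
      · rintro (heq | hsuf)
        · refine ⟨0, ?_, ?_⟩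
          · have h0 := List.length_pos_of_ne_nil (pvDsplit_ne_nil rest)
            simp only [List.length_cons]; omega
          · simp only [List.drop_succ_cons, List.drop_zero, pvJoin_dsplit]
            cases heq; rfl
        · obtain ⟨j, hj, hjoin⟩ := (ih dom).mpr hsuf
          exact ⟨j + 1, by simpa using hj, by simpa using hjoin⟩
    · simp only [pvDsplit, if_neg hc]
      have hnot : ¬ ('.' :: dom) <:+ (c :: rest) ∨ True := Or.inr trivial
      rw [List.suffix_cons_iff]
      have hne : ('.' :: dom) ≠ c :: rest := by
        intro h; exact hc (by injection h with h1 _; exact h1.symm)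
      cases hdr : pvDsplit rest with
      | nil => exact absurd hdr (pvDsplit_ne_nil rest)
      | cons p ps =>
        rw [hdr] at ih
        constructor
        · rintro ⟨j, hj, hjoin⟩
          simp only [List.length_cons, List.drop_succ_cons] at hj hjoin
          right
          exact (ih dom).mp ⟨j, by simpa using hj, by simpa using hjoin⟩
        · rintro (heq | hsuf)
          · exact absurd heq hne
          · obtain ⟨j, hj, hjoin⟩ := (ih dom).mpr hsuf
            exact ⟨j, by simpa using hj, by simpa using hjoin⟩

theorem pvMain_char (cs dom : List Char) :
    (∃ i, i < (pvDsplit cs).length ∧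
        PySem.Chars.join ['.'] ((pvDsplit cs).drop i) = dom)
      ↔ (cs = dom ∨ ('.' :: dom) <:+ cs) := by
  constructor
  · rintro ⟨i, hi, hjoin⟩
    cases i with
    | zero =>
      left; rw [List.drop_zero, pvJoin_dsplit] at hjoin; exact hjoin
    | succ j =>
      right; exact (pvSuffix_char cs dom).mp ⟨j, hi, hjoin⟩
  · rintro (heq | hsuf)
    · refine ⟨0, ?_, ?_⟩
      · exact List.length_pos_of_ne_nil (pvDsplit_ne_nil cs)
      · rw [List.drop_zero, pvJoin_dsplit]; exact heq
    · obtain ⟨j, hj, hjoin⟩ := (pvSuffix_char cs dom).mpr hsuf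
      exact ⟨j + 1, hj, hjoin⟩

theorem pvMem_fold (allowed : List String) (s : PySem.Set (List Char)) (x : List Char) :
    x ∈ allowed.foldl (fun s raw =>
        let dom := pvNormDom raw
        if dom = [] then s else PySem.Set.add s dom) s
      ↔ x ∈ s ∨ ∃ raw ∈ allowed, pvNormDom raw ≠ [] ∧ x = pvNormDom raw := by
  induction allowed generalizing s with
  | nil => simp
  | cons a t ih =>
    rw [List.foldl_cons, ih]
    by_cases h : pvNormDom a = []
    · simp only [h, reduceIte, List.mem_cons]
      constructor
      · rintro (hs | ⟨r, hr, hne, hx⟩)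
        · exact Or.inl hs
        · exact Or.inr ⟨r, Or.inr hr, hne, hx⟩
      · rintro (hs | ⟨r, (rfl | hr), hne, hx⟩)
        · exact Or.inl hs
        · exact absurd h hne
        · exact Or.inr ⟨r, hr, hne, hx⟩
    · simp only [if_neg h, PySem.Set.mem_add, List.mem_cons]
      constructor
      · rintro ((hs | hx) | ⟨r, hr, hne, hx2⟩)
        · exact Or.inl hs
        · exact Or.inr ⟨a, Or.inl rfl, h, hx⟩
        · exact Or.inr ⟨r, Or.inr hr, hne, hx2⟩
      · rintro (hs | ⟨r, (rfl | hr), hne, hx⟩)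
        · exact Or.inl (Or.inl hs)
        · exact Or.inl (Or.inr hx)
        · exact Or.inr ⟨r, hr, hne, hx⟩

theorem pvPortsEq (hostname : String) (allowed_domains : List String) :
    hostname_in_allowlist_py hostname allowed_domains
      = hostname_in_allowlist_py_alt hostname allowed_domains := by
  simp only [hostname_in_allowlist_py, hostname_in_allowlist_py_alt]
  by_cases hh : pvNormHost hostname = []
  · simp [hh]
  · rw [if_neg hh, if_neg hh]
    rw [Bool.eq_iff_iff]
    simp only [List.any_eq_true, List.mem_range]
    rw [pvSplitOn_eq_dsplit]
    constructor
    · rintro ⟨raw, hraw, hb⟩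
      by_cases hd : pvNormDom raw = []
      · simp [hd] at hb
      · rw [if_neg hd] at hb
        simp only [Bool.or_eq_true, beq_iff_eq, PySem.Chars.endswith_iff] at hb
        obtain ⟨i, hi, hjoin⟩ := (pvMain_char (pvNormHost hostname) (pvNormDom raw)).mpr hb
        refine ⟨i, hi, ?_⟩
        simp only [PySem.Set.contains, List.contains_iff_mem]  -- name guess
        rw [hjoin]
        exact (pvMem_fold allowed_domains PySem.Set.empty _).mpr
          (Or.inr ⟨raw, hraw, hd, rfl⟩)
    · rintro ⟨i, hi, hc⟩
      simp only [PySem.Set.contains, List.contains_iff_mem] at hc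
      obtain hmem := (pvMem_fold allowed_domains PySem.Set.empty _).mp hc
      rcases hmem with hmem | ⟨raw, hraw, hne, hx⟩
      · simp [PySem.Set.empty] at hmem
      · refine ⟨raw, hraw, ?_⟩
        rw [if_neg hne]
        simp only [Bool.or_eq_true, beq_iff_eq, PySem.Chars.endswith_iff]
        exact (pvMain_char (pvNormHost hostname) (pvNormDom raw)).mp ⟨i, hi, hx ▸ rfl⟩

-- ===== VERDICT (by name: the statement is the Claim_ definition above) =====
theorem hostname_in_allowlist_py_spec : Claim_equal_hostname_in_allowlist_py := by
  intro hostname allowed_domains _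
  unfold Spec_hostname_in_allowlist_py
  exact pvPortsEq hostname allowed_domains
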